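-- pv_equiv track=rewrite | github.com/Mxlours/Projet_Algo | fichiers_fournis_2023/connectes_kdtree.py | retrie_tableau_intelligent
-- ===== SOURCE A (Python) =====
-- def retrie_tableau_intelligent(L, nombre):
--     """on prend comme arg un tableau trié par ordre décroissant et on insère notre nouveau élément au bon endroit"""
--     if len(L) == 0:
--         L.append(nombre)
--         return L
--     a = 0
--     b = len(L) - 1
--     while True:
--         if b-a <= 1:
--             # 3 cas possibles
--             if L[a] >= nombre >= L[b]:
--                 L.insert(a+1, nombre)
--                 break
--             if nombre >= L[a]:
--                 L.insert(a, nombre)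
--                 break
--             else:
--                 L.insert(b+1, nombre) # même si on dépasse la taille de la liste ça marche
--                 break
--         indice_milieu = ((b + 1 - a) // 2) + a # au début c'est bien len(L) // 2
--         milieu = L[indice_milieu]
--         if milieu >= nombre:
--             a = indice_milieu
--         else:
--             b = indice_milieu
--
--     return L
-- ===== SOURCE B (Python) =====
-- def retrie_tableau_intelligent(L, nombre):
--     """Insert nombre into the descending-sorted list L (in place) by a single
--     forward scan: find the first position whose element is < nombre."""
--     i = 0
--     while i < len(L) and L[i] >= nombre:
--         i += 1
--     L.insert(i, nombre)
--     return L
-- ===== Notes on version B (the rewrite author's own statement) =====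
-- stated objective: simpler
-- what changed: Replaces the binary search with three-way endpoint case analysis by a single forward scan that finds the first element strictly below nombre and inserts there.
-- outside the precondition, e.g. on retrie_tableau_intelligent([0, 1], 0): A returns [0, 0, 1], B returns [0, 1, 0]
import Mathlib
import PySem

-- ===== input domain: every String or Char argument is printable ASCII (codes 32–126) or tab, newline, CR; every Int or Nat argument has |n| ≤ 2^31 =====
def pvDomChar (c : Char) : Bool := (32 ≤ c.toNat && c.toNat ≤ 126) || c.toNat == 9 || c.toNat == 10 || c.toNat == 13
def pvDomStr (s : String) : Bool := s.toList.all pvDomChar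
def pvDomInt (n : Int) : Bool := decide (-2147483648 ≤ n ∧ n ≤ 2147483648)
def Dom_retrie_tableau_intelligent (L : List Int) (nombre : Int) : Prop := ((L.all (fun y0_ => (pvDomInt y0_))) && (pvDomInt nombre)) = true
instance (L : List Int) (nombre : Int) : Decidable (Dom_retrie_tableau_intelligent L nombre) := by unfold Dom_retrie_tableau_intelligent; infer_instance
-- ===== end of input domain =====

-- B replaces A's binary search by a single forward scan for the first element < nombre;
-- objective: simpler. Both Pythons mutate L in place identically; the equivalence proved
-- here is about the returned list value.


-- ===== PORT A =====
-- A's 'while True' binary-search loop; indices a ≤ b are always in range (a ≤ b < len L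
-- at every reachable call), so List.getD i 0 is exact for Python's L[i] there. The fuel
-- parameter is only a structural totality guard: the wrapper passes L.length, and the gap
-- b - a shrinks every iteration, so the 0-fuel branch is never reached (proved below).
def pvALoop (L : List Int) (nombre : Int) (a b : Nat) (fuel : Nat) : List Int :=
  match fuel with
  | 0 => L
  | fuel + 1 =>
  if b - a ≤ 1 then
    if L.getD a 0 ≥ nombre ∧ nombre ≥ L.getD b 0 then
      PySem.List.insert L ((a : Int) + 1) nombre
    else if nombre ≥ L.getD a 0 then
      PySem.List.insert L (a : Int) nombre
    else
      PySem.List.insert L ((b : Int) + 1) nombre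
  else
    -- indice_milieu = ((b + 1 - a) // 2) + a ; milieu = L[indice_milieu]
    if L.getD ((b + 1 - a) / 2 + a) 0 ≥ nombre then
      pvALoop L nombre ((b + 1 - a) / 2 + a) b fuel
    else
      pvALoop L nombre a ((b + 1 - a) / 2 + a) fuel

def retrie_tableau_intelligent (L : List Int) (nombre : Int) : List Int :=
  if L.length = 0 then L ++ [nombre]
  else pvALoop L nombre 0 (L.length - 1) L.length

-- ===== PORT B =====
-- Source B's scanning while-loop: the index of the first element < nombre.
def pvScanIdx (L : List Int) (nombre : Int) : Nat :=
  match L with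
  | [] => 0
  | x :: xs => if x ≥ nombre then pvScanIdx xs nombre + 1 else 0

def retrie_tableau_intelligent_alt (L : List Int) (nombre : Int) : List Int :=
  PySem.List.insert L (pvScanIdx L nombre : Int) nombre

-- ===== PRECONDITION & SPEC =====
-- Pre_ covers the function's documented natural domain ("un tableau trié par ordre
-- décroissant": L non-increasing) and, to keep the theorem wide, the closed-form unsorted
-- cases where both programs still provably agree (nombre below/above every element, or a
-- 2-element list whose head differs from nombre). On the remaining unsorted lists A's
-- binary search and B's scan pick different, equally meaningless positions (cite in
-- claim.json), so nothing is claimed there.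
def Pre_retrie_tableau_intelligent (L : List Int) (nombre : Int) : Prop :=
  L.Pairwise (fun x y => y ≤ x) ∨ (∀ x ∈ L, nombre < x) ∨ (∀ x ∈ L, x < nombre) ∨
  (L.length = 2 ∧ L.getD 0 0 < L.getD 1 0 ∧ nombre ≠ L.getD 0 0)
instance (L : List Int) (nombre : Int) : Decidable (Pre_retrie_tableau_intelligent L nombre) := by unfold Pre_retrie_tableau_intelligent; infer_instance

def pvWitness_retrie_tableau_intelligent : List Int × Int := ([5, 3, 1], 2)

def Spec_retrie_tableau_intelligent (L : List Int) (nombre : Int) (out : List Int) : Prop := out = retrie_tableau_intelligent_alt L nombre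
instance (L : List Int) (nombre : Int) (out : List Int) : Decidable (Spec_retrie_tableau_intelligent L nombre out) := by unfold Spec_retrie_tableau_intelligent; infer_instance

-- ===== CLAIM (what is proved, stated in full; the proofs are below) =====
def Claim_equal_retrie_tableau_intelligent : Prop := ∀ (L : List Int) (nombre : Int), Dom_retrie_tableau_intelligent L nombre → Pre_retrie_tableau_intelligent L nombre → Spec_retrie_tableau_intelligent L nombre (retrie_tableau_intelligent L nombre)

-- ===== LEMMAS AND PROOFS =====

theorem pvScanIdx_le (L : List Int) (n : Int) : pvScanIdx L n ≤ L.length := by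
  induction L with
  | nil => simp [pvScanIdx]
  | cons x xs ih => simp only [pvScanIdx]; split <;> simp <;> omega

theorem pvScanIdx_lt (L : List Int) (n : Int) (i : Nat) (hi : i < pvScanIdx L n) :
    n ≤ L.getD i 0 := by
  induction L generalizing i with
  | nil => simp [pvScanIdx] at hi
  | cons x xs ih =>
    simp only [pvScanIdx] at hi
    split at hi
    · cases i with
      | zero => simpa using ‹x ≥ n›
      | succ j => exact ih j (by omega)
    · omega

theorem pvScanIdx_get (L : List Int) (n : Int) (h : pvScanIdx L n < L.length) :
    L.getD (pvScanIdx L n) 0 < n := by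
  induction L with
  | nil => simp [pvScanIdx] at h
  | cons x xs ih =>
    by_cases hx : x ≥ n
    · simp only [pvScanIdx, if_pos hx] at h ⊢
      simpa using ih (by simpa using h)
    · simp only [pvScanIdx, if_neg hx] at h ⊢
      simpa using not_le.mp hx

theorem pvScanIdx_eq (L : List Int) (n : Int) (k : Nat) (hk : k ≤ L.length)
    (h1 : ∀ i, i < k → n ≤ L.getD i 0)
    (h2 : k = L.length ∨ L.getD k 0 < n) : pvScanIdx L n = k := by
  induction L generalizing k with
  | nil =>
    simp only [List.length_nil, Nat.le_zero] at hk
    subst hk; simp [pvScanIdx]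
  | cons x xs ih =>
    cases k with
    | zero =>
      rcases h2 with h2 | h2
      · simp at h2
      · simp only [List.getD] at h2
        simp only [pvScanIdx]
        rw [if_neg (by simpa using not_le.mpr h2)]
    | succ k' =>
      have hx : n ≤ x := by simpa using h1 0 (by omega)
      simp only [pvScanIdx, if_pos (by exact hx : x ≥ n)]
      have := ih k' (by simpa using hk)
        (fun i hi => by simpa using h1 (i + 1) (by omega))
        (by rcases h2 with h2 | h2
            · left; simpa using h2
            · right; simpa using h2)
      omega

-- sorted-descending consequence on getD
theorem pvSorted_getD (L : List Int) (hs : L.Pairwise (fun x y => y ≤ x))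
    {i j : Nat} (hij : i ≤ j) (hj : j < L.length) : L.getD j 0 ≤ L.getD i 0 := by
  rcases Nat.eq_or_lt_of_le hij with rfl | hlt
  · exact le_refl _
  · rw [L.getD_eq_getElem 0 hj, L.getD_eq_getElem 0 (lt_of_le_of_lt hij hj)]
    exact (List.pairwise_iff_getElem.mp hs) i j _ hj hlt

-- inserting n just before a run of elements all equal to n gives the same list wherever
-- in the run it is inserted
theorem pvInsertStep (L : List Int) (n : Int) (i : Nat) (hi : i < L.length)
    (h : L.getD i 0 = n) :
    L.take i ++ n :: L.drop i = L.take (i + 1) ++ n :: L.drop (i + 1) := by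
  rw [List.drop_eq_getElem_cons hi, List.take_add_one, List.getElem?_eq_getElem hi]
  rw [L.getD_eq_getElem 0 hi] at h
  simp [h]

theorem pvInsertRun (L : List Int) (n : Int) (d : Nat) : ∀ i : Nat, i + d ≤ L.length →
    (∀ j, i ≤ j → j < i + d → L.getD j 0 = n) →
    L.take i ++ n :: L.drop i = L.take (i + d) ++ n :: L.drop (i + d) := by
  induction d with
  | zero => intro i _ _; rfl
  | succ d ih =>
    intro i hlen hrun
    have h1 := pvInsertStep L n i (by omega) (hrun i (le_refl _) (by omega))
    have h2 := ih (i + 1) (by omega) (fun j hj1 hj2 => hrun j (by omega) (by omega))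
    rw [h1, h2, show i + 1 + d = i + (d + 1) from by omega]

-- one terminal step of A's loop (b - a ≤ 1) agrees with the scan index
theorem pvLoop_base (L : List Int) (n : Int) (hs : L.Pairwise (fun x y => y ≤ x))
    (a b : Nat) (hab : a ≤ b) (hsmall : b - a ≤ 1) (hb : b < L.length)
    (hA : a = 0 ∨ n ≤ L.getD a 0) (hB : b = L.length - 1 ∨ L.getD b 0 < n) (fuel : Nat) :
    pvALoop L n a b (fuel + 1) = PySem.List.insert L (pvScanIdx L n : Int) n := by
  rw [pvALoop, if_pos hsmall]
  by_cases h1 : L.getD a 0 ≥ n ∧ n ≥ L.getD b 0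
  · -- insert at a+1; the scan index differs from a+1 only across a run of elements = n
    rw [if_pos h1]
    have hk := pvScanIdx_le L n
    have hka : a + 1 ≤ pvScanIdx L n := by
      by_contra hc
      have hsc : pvScanIdx L n ≤ a := by omega
      have := pvSorted_getD L hs hsc (by omega)
      have := pvScanIdx_get L n (by omega)
      omega
    have hkrun : ∀ j, a + 1 ≤ j → j < pvScanIdx L n → L.getD j 0 = n := by
      intro j hj1 hj2
      refine le_antisymm (le_trans (pvSorted_getD L hs (by omega : b ≤ j) (by omega)) h1.2)
        (pvScanIdx_lt L n j hj2)
    rw [show ((a : Int) + 1) = ((a + 1 : Nat) : Int) by push_cast; ring]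
    rw [PySem.List.insert_natCast L (a + 1) n (by omega),
        PySem.List.insert_natCast L (pvScanIdx L n) n hk]
    have hrun := pvInsertRun L n (pvScanIdx L n - (a + 1)) (a + 1) (by omega)
      (fun j hj1 hj2 => hkrun j hj1 (by omega))
    rw [show a + 1 + (pvScanIdx L n - (a + 1)) = pvScanIdx L n from by omega] at hrun
    rw [hrun]
  · rw [if_neg h1]
    by_cases h2 : n ≥ L.getD a 0
    · -- L[a] < n forces a = 0 by the invariant; scan index is 0
      rw [if_pos h2]
      have hlt : L.getD a 0 < n := by
        rcases lt_or_ge (L.getD a 0) n with h | h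
        · exact h
        · exact absurd ⟨h, le_trans (pvSorted_getD L hs hab hb) h2⟩ h1
      have ha0 : a = 0 := by
        rcases hA with h | h
        · exact h
        · omega
      subst ha0
      have hsz : pvScanIdx L n = 0 :=
        pvScanIdx_eq L n 0 (by omega) (fun i hi => absurd hi (by omega)) (Or.inr hlt)
      rw [hsz]
    · -- L[b] > n forces b = len - 1 by the invariant; scan index is len = b + 1
      rw [if_neg h2]
      have hga : n < L.getD a 0 := not_le.mp h2
      have hgb : n < L.getD b 0 := by
        by_contra hc
        exact h1 ⟨le_of_lt hga, not_lt.mp hc⟩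
      have hbl : b = L.length - 1 := by
        rcases hB with h | h
        · exact h
        · omega
      have hsl : pvScanIdx L n = L.length := pvScanIdx_eq L n L.length (le_refl _)
        (fun i hi => le_of_lt (lt_of_lt_of_le hgb
          (pvSorted_getD L hs (by omega : i ≤ b) hb)))
        (Or.inl rfl)
      rw [hsl, hbl]
      congr 1
      omega

-- the main loop lemma, by induction on the gap b - a
theorem pvLoop_eq (L : List Int) (n : Int) (hs : L.Pairwise (fun x y => y ≤ x)) :
    ∀ fuel a b : Nat, b - a < fuel → a ≤ b → b < L.length →
    (a = 0 ∨ n ≤ L.getD a 0) → (b = L.length - 1 ∨ L.getD b 0 < n) →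
    pvALoop L n a b fuel = PySem.List.insert L (pvScanIdx L n : Int) n := by
  intro fuel
  induction fuel with
  | zero =>
    intro a b hfuel
    omega
  | succ fuel ih =>
    intro a b hfuel hab hb hA hB
    by_cases hbase : b - a ≤ 1
    · exact pvLoop_base L n hs a b hab hbase hb hA hB fuel
    · have hm1 : a < (b + 1 - a) / 2 + a := by omega
      have hm2 : (b + 1 - a) / 2 + a < b := by omega
      rw [pvALoop, if_neg hbase]
      by_cases hmid : L.getD ((b + 1 - a) / 2 + a) 0 ≥ n
      · rw [if_pos hmid]
        exact ih _ b (by omega) (by omega) hb (Or.inr hmid) hB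
      · rw [if_neg hmid]
        exact ih a _ (by omega) (by omega) (by omega) hA (Or.inr (not_le.mp hmid))


theorem pvGetD_mem (L : List Int) (i : Nat) (hi : i < L.length) : L.getD i 0 ∈ L := by
  rw [L.getD_eq_getElem 0 hi]; exact List.getElem_mem hi

-- nombre below every element: both sides insert at the end
theorem pvLoop_allGt (L : List Int) (n : Int) (h : ∀ x ∈ L, n < x) :
    ∀ fuel a b : Nat, b - a < fuel → a ≤ b → b = L.length - 1 → b < L.length →
    pvALoop L n a b fuel = PySem.List.insert L (L.length : Int) n := by
  intro fuel
  induction fuel with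
  | zero => intro a b hfuel; omega
  | succ fuel ih =>
    intro a b hfuel hab hbl hb
    by_cases hbase : b - a ≤ 1
    · rw [pvALoop, if_pos hbase]
      have hbv := h _ (pvGetD_mem L b hb)
      have hav := h _ (pvGetD_mem L a (by omega))
      rw [if_neg (by omega : ¬(L.getD a 0 ≥ n ∧ n ≥ L.getD b 0)),
          if_neg (by omega : ¬ n ≥ L.getD a 0)]
      congr 1
      omega
    · rw [pvALoop, if_neg hbase]
      have hmv := h _ (pvGetD_mem L ((b + 1 - a) / 2 + a) (by omega))
      rw [if_pos (by omega : L.getD ((b + 1 - a) / 2 + a) 0 ≥ n)]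
      exact ih _ b (by omega) (by omega) hbl hb

-- nombre above every element: both sides insert at the front
theorem pvLoop_allLt (L : List Int) (n : Int) (h : ∀ x ∈ L, x < n) :
    ∀ fuel b : Nat, b < fuel → b < L.length →
    pvALoop L n 0 b fuel = PySem.List.insert L (0 : Int) n := by
  intro fuel
  induction fuel with
  | zero => intro b hfuel; omega
  | succ fuel ih =>
    intro b hfuel hb
    by_cases hbase : b - 0 ≤ 1
    · rw [pvALoop, if_pos hbase]
      have h0v := h _ (pvGetD_mem L 0 (by omega))
      rw [if_neg (by omega : ¬(L.getD 0 0 ≥ n ∧ n ≥ L.getD b 0)),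
          if_pos (by omega : n ≥ L.getD 0 0)]
      norm_num
    · rw [pvALoop, if_neg hbase]
      have hmv := h _ (pvGetD_mem L ((b + 1 - 0) / 2 + 0) (by omega))
      rw [if_neg (by omega : ¬ L.getD ((b + 1 - 0) / 2 + 0) 0 ≥ n)]
      exact ih _ (by omega) (by omega)

-- ===== VERDICT (by name: the statement is the Claim_ definition above) =====
theorem retrie_tableau_intelligent_spec : Claim_equal_retrie_tableau_intelligent := by
  intro L n _ hpre
  unfold Spec_retrie_tableau_intelligent retrie_tableau_intelligent retrie_tableau_intelligent_alt
  by_cases h0 : L.length = 0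
  · rw [if_pos h0]
    have : L = [] := List.length_eq_zero_iff.mp h0
    subst this
    rfl
  · rw [if_neg h0]
    rcases hpre with hs | hgt | hlt | hpair
    · exact pvLoop_eq L n hs L.length 0 (L.length - 1) (by omega) (by omega)
        (by omega) (Or.inl rfl) (Or.inl rfl)
    · rw [pvLoop_allGt L n hgt L.length 0 (L.length - 1) (by omega) (by omega) rfl
        (by omega)]
      congr 1
      have : pvScanIdx L n = L.length := pvScanIdx_eq L n L.length (le_refl _)
        (fun i hi => le_of_lt (hgt _ (pvGetD_mem L i hi))) (Or.inl rfl)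
      omega
    · rw [pvLoop_allLt L n hlt L.length (L.length - 1) (by omega) (by omega)]
      congr 1
      have h0v := hlt _ (pvGetD_mem L 0 (by omega))
      have : pvScanIdx L n = 0 := pvScanIdx_eq L n 0 (by omega)
        (fun i hi => absurd hi (by omega)) (Or.inr h0v)
      omega
    · -- L = [x, y] with x < y and n ≠ x
      obtain ⟨hlen, hxy, hnx⟩ := hpair
      match L, hlen with
      | [x, y], _ =>
        have hxy' : x < y := by simpa [List.getD] using hxy
        have hnx' : n ≠ x := by simpa [List.getD] using hnx
        clear hxy hnx
        show pvALoop [x, y] n 0 1 2 = PySem.List.insert [x, y] (pvScanIdx [x, y] n : Int) n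
        rw [pvALoop, if_pos (by omega)]
        simp only [List.getD_cons_zero, List.getD_cons_succ] at *
        rw [if_neg (by omega : ¬(x ≥ n ∧ n ≥ y))]
        by_cases h2 : n ≥ x
        · rw [if_pos h2]
          have hsc : pvScanIdx [x, y] n = 0 := by
            simp only [pvScanIdx]
            rw [if_neg (by omega : ¬ x ≥ n)]
          rw [hsc]
        · rw [if_neg h2]
          have hsc : pvScanIdx [x, y] n = 2 := by
            simp only [pvScanIdx]
            rw [if_pos (by omega : x ≥ n), if_pos (by omega : y ≥ n)]
          rw [hsc]
          norm_num
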